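-- pv_equiv track=rewrite | github.com/FallyxInc/VoiceAssistant | general_intelligence/wake_word_listener.py | detect_wake_word
-- ===== SOURCE A (Python) =====
-- def detect_wake_word(text):
--     """Return True if the wake word is detected in the text."""
--     if not text:
--         return False
--
--     # Normalize the text by removing punctuation and converting to lowercase
--     text = text.lower().replace('.', '').replace(',', '').replace('!', '').replace('?', '')
--
--     # List of possible wake word variations
--     wake_words = [
--         "woolly", "hey woolly",
--         "wolly", "hey wolly",
--         "wooly", "hey wooly",
--         "willy", "hey willy",
--         "willie", "hey willie",
--         "wally", "hey wally",
--         "olly", "hey olly",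
--         "wollie", "hey wollie",
--         "wolli", "hey wolli",
--         "woli", "hey woli",
--         "woll", "hey woll"
--     ]
--
--     # Check for exact matches
--     if any(wake_word in text for wake_word in wake_words):
--         return True
--
--     # Check for similar pronunciations using common mishearings
--     similar_words = {
--         "woolly": ["willy", "wally", "olly", "wollie", "wolli", "woli", "woll"],
--         "wolly": ["willy", "wally", "olly", "wollie", "wolli", "woli", "woll"],
--         "wooly": ["willy", "wally", "olly", "wollie", "wolli", "woli", "woll"]
--     }
--
--     # Check if any part of the text contains a similar word
--     words = text.split()
--     for word in words:
--         for base_word, variations in similar_words.items():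
--             if word in variations:
--                 return True
--
--     return False
-- ===== SOURCE B (Python) =====
-- # Single left-to-right scan matching a minimal 7-word cover of the 22 wake-word
-- # variants (every listed variant contains one of these, and each of these is a
-- # listed variant), so one pass replaces the 22-substring test and the redundant
-- # similar-words split loop.
-- _CORE_WAKE_WORDS = ("olly", "woll", "woli", "willy", "willie", "wally", "wooly")
--
-- def detect_wake_word(text):
--     """Return True if the wake word is detected in the text."""
--     if not text:
--         return False
--     text = text.lower().replace('.', '').replace(',', '').replace('!', '').replace('?', '')
--     for i in range(len(text)):
--         for w in _CORE_WAKE_WORDS: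
--             if text.startswith(w, i):
--                 return True
--     return False
-- ===== Notes on version B (the rewrite author's own statement) =====
-- stated objective: alternative
-- what changed: Replaces A's 22-way any-substring test plus the redundant split/similar-words second pass with a single left-to-right positional scan that matches a minimal 7-word cover of the wake-word variants via startswith at each index.
import Mathlib
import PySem

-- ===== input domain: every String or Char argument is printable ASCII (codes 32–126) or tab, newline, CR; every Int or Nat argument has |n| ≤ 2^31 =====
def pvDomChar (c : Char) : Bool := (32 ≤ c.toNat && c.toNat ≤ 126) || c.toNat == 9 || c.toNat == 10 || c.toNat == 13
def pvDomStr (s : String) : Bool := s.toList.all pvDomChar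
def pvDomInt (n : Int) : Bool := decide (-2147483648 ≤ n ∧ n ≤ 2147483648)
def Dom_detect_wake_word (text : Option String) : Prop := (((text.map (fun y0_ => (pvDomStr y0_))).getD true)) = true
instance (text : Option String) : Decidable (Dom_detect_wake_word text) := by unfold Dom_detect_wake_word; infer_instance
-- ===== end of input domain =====

-- B replaces A's 22-way substring test plus the redundant similar-words split pass by one
-- left-to-right scan matching a minimal 7-word cover of the variants (objective: alternative).

-- ===== PORT A =====
-- A's in-function literal lists, lifted to named constants (contents verbatim)
def wakeWords : List String :=
  ["woolly", "hey woolly",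
   "wolly", "hey wolly",
   "wooly", "hey wooly",
   "willy", "hey willy",
   "willie", "hey willie",
   "wally", "hey wally",
   "olly", "hey olly",
   "wollie", "hey wollie",
   "wolli", "hey wolli",
   "woli", "hey woli",
   "woll", "hey woll"]

def similarWords : PySem.Dict String (List String) :=
  PySem.Dict.ofList
    [("woolly", ["willy", "wally", "olly", "wollie", "wolli", "woli", "woll"]),
     ("wolly",  ["willy", "wally", "olly", "wollie", "wolli", "woli", "woll"]),
     ("wooly",  ["willy", "wally", "olly", "wollie", "wolli", "woli", "woll"])]

def detect_wake_word (text : Option String) : Bool :=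
  match text with
  | none => false                         -- `if not text` (None is falsy)
  | some t0 =>
    if t0 = "" then false                 -- `if not text` (empty string is falsy)
    else
      let t := PySem.Str.replace (PySem.Str.replace (PySem.Str.replace (PySem.Str.replace
                 (PySem.Str.lower t0) "." "") "," "") "!" "") "?" ""
      if wakeWords.any (fun w => PySem.Str.isIn w t) then true
      else
        let words := PySem.Str.split₀ t
        -- for word in words: for base_word, variations in similar_words.items(): if word in variations: return True
        if words.any (fun word => (similarWords.items).any (fun p => p.2.contains word)) then true
        else false

-- ===== PORT B =====
def coreWakeWords : List String := ["olly", "woll", "woli", "willy", "willie", "wally", "wooly"]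

def detect_wake_word_alt (text : Option String) : Bool :=
  match text with
  | none => false
  | some t0 =>
    if t0 = "" then false
    else
      let t := PySem.Str.replace (PySem.Str.replace (PySem.Str.replace (PySem.Str.replace
                 (PySem.Str.lower t0) "." "") "," "") "!" "") "?" ""
      -- `t.startswith(w, i)` for 0 ≤ i ≤ len(t) is startswith on the suffix from i (exact there)
      (List.range (PySem.Str.len t).toNat).any (fun i =>
        coreWakeWords.any (fun w => PySem.Chars.startswith (t.toList.drop i) w.toList))

-- ===== PRECONDITION & SPEC =====
def Spec_detect_wake_word (text : Option String) (out : Bool) : Prop := out = detect_wake_word_alt text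
instance (text : Option String) (out : Bool) : Decidable (Spec_detect_wake_word text out) := by unfold Spec_detect_wake_word; infer_instance

-- ===== CLAIM (what is proved, stated in full; the proofs are below) =====
def Claim_equal_detect_wake_word : Prop := ∀ (text : Option String), Dom_detect_wake_word text → Spec_detect_wake_word text (detect_wake_word text)

-- ===== LEMMAS AND PROOFS =====

-- every word produced by split() is an infix of the input
lemma split₀_go_mem (s : List Char) (cur : List Char) (acc : List (List Char)) (w : List Char)
    (h : w ∈ PySem.Chars.split₀.go s cur acc) : w ∈ acc ∨ w <:+: (cur.reverse ++ s) := by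
  induction s generalizing cur acc with
  | nil =>
    simp only [PySem.Chars.split₀.go] at h
    split_ifs at h with hc
    · simp only [List.mem_reverse] at h
      exact Or.inl h
    · simp only [List.mem_reverse, List.mem_cons] at h
      rcases h with rfl | h
      · exact Or.inr ⟨[], [], by simp⟩
      · exact Or.inl h
  | cons c rest ih =>
    simp only [PySem.Chars.split₀.go] at h
    split_ifs at h with hsp hc
    · rcases ih _ _ h with h' | h'
      · exact Or.inl h'
      · simp only [List.isEmpty_iff] at hc
        subst hc
        exact Or.inr (h'.trans ⟨[c], [], by simp⟩)
    · rcases ih _ _ h with h' | h'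
      · rcases List.mem_cons.mp h' with rfl | h''
        · exact Or.inr ⟨[], c :: rest, by simp⟩
        · exact Or.inl h''
      · exact Or.inr (h'.trans ⟨cur.reverse ++ [c], [], by simp⟩)
    · rcases ih _ _ h with h' | h'
      · exact Or.inl h'
      · exact Or.inr (by simpa using h')

lemma mem_split₀_infix (s w : List Char) (h : w ∈ PySem.Chars.split₀ s) : w <:+: s := by
  rcases split₀_go_mem s [] [] w h with h' | h'
  · simp at h'
  · simpa using h'

-- every word of wakeWords contains one of the 7 core words
lemma cover (cs : List Char) (w : String) (hw : w ∈ wakeWords) (hinf : w.toList <:+: cs) :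
    ∃ v ∈ coreWakeWords, v.toList <:+: cs := by
  fin_cases hw <;>
    first
      | exact ⟨"olly", by decide, List.IsInfix.trans (by decide) hinf⟩
      | exact ⟨"woll", by decide, List.IsInfix.trans (by decide) hinf⟩
      | exact ⟨"woli", by decide, List.IsInfix.trans (by decide) hinf⟩
      | exact ⟨"willy", by decide, List.IsInfix.trans (by decide) hinf⟩
      | exact ⟨"willie", by decide, List.IsInfix.trans (by decide) hinf⟩
      | exact ⟨"wally", by decide, List.IsInfix.trans (by decide) hinf⟩
      | exact ⟨"wooly", by decide, List.IsInfix.trans (by decide) hinf⟩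

-- an infix wake word is found by B's positional scan
lemma scan_of_infix (s : String) (w : String) (hw : w ∈ wakeWords) (hinf : w.toList <:+: s.toList) :
    (List.range (PySem.Str.len s).toNat).any (fun i =>
      coreWakeWords.any (fun v => PySem.Chars.startswith (s.toList.drop i) v.toList)) = true := by
  obtain ⟨v, hv, hvinf⟩ := cover s.toList w hw hinf
  have hne : v.toList ≠ [] := by fin_cases hv <;> decide
  have hIn : PySem.Chars.isIn v.toList s.toList = true := (PySem.Chars.isIn_iff_infix _ _).mpr hvinf
  obtain ⟨j, hj⟩ := (PySem.Chars.exists_prefix_drop_iff_isIn _ _).mpr hIn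
  have hjlt : j < s.toList.length := by
    by_contra hge
    have : s.toList.drop j = [] := List.drop_eq_nil_of_le (by omega)
    rw [this] at hj
    exact hne (List.prefix_nil.mp hj)
  rw [List.any_eq_true]
  refine ⟨j, ?_, ?_⟩
  · rw [List.mem_range]
    simp [PySem.Str.len, -String.length_toList]; omega
  · rw [List.any_eq_true]
    exact ⟨v, hv, (PySem.Chars.startswith_iff _ _).mpr hj⟩

-- the two decision procedures agree on the normalized string
lemma core_eq (s : String) :
    (if wakeWords.any (fun w => PySem.Str.isIn w s) then true
     else if (PySem.Str.split₀ s).any (fun word => (similarWords.items).any (fun p => p.2.contains word)) then true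
     else false)
  = (List.range (PySem.Str.len s).toNat).any (fun i =>
      coreWakeWords.any (fun v => PySem.Chars.startswith (s.toList.drop i) v.toList)) := by
  split_ifs with h1 h2
  · -- exact-match branch fired: some wake word is an infix, so the scan finds a core word
    rw [List.any_eq_true] at h1
    obtain ⟨w, hw, hwin⟩ := h1
    exact (scan_of_infix s w hw ((PySem.Str.isIn_iff_infix _ _).mp hwin)).symm
  · -- similar-words branch fired: the split word itself is a wake word and an infix
    rw [List.any_eq_true] at h2
    obtain ⟨word, hword, hp⟩ := h2
    rw [List.any_eq_true] at hp
    obtain ⟨p, hpmem, hpc⟩ := hp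
    have hitems : similarWords.items =
        [("woolly", ["willy", "wally", "olly", "wollie", "wolli", "woli", "woll"]),
         ("wolly",  ["willy", "wally", "olly", "wollie", "wolli", "woli", "woll"]),
         ("wooly",  ["willy", "wally", "olly", "wollie", "wolli", "woli", "woll"])] := by decide
    rw [hitems] at hpmem
    have hwvar : word ∈ (["willy", "wally", "olly", "wollie", "wolli", "woli", "woll"] : List String) := by
      fin_cases hpmem <;> simpa using hpc
    have hwk : word ∈ wakeWords := by fin_cases hwvar <;> decide
    have hsplit : word.toList ∈ PySem.Chars.split₀ s.toList := by
      have := List.mem_map_of_mem (f := String.toList) hword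
      rwa [PySem.Str.split₀_map_toList] at this
    exact (scan_of_infix s word hwk (mem_split₀_infix _ _ hsplit)).symm
  · -- neither branch fired: the scan must fail too
    by_contra hne
    have hscan : (List.range (PySem.Str.len s).toNat).any (fun i =>
        coreWakeWords.any (fun v => PySem.Chars.startswith (s.toList.drop i) v.toList)) = true := by
      cases hB : (List.range (PySem.Str.len s).toNat).any (fun i =>
          coreWakeWords.any (fun v => PySem.Chars.startswith (s.toList.drop i) v.toList)) with
      | false => exact absurd hB.symm hne
      | true => rfl
    rw [List.any_eq_true] at hscan
    obtain ⟨i, _, hi⟩ := hscan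
    rw [List.any_eq_true] at hi
    obtain ⟨v, hv, hvs⟩ := hi
    have hpref := (PySem.Chars.startswith_iff _ _).mp hvs
    have hIn : PySem.Chars.isIn v.toList s.toList = true :=
      (PySem.Chars.exists_prefix_drop_iff_isIn _ _).mp ⟨i, hpref⟩
    have hvk : v ∈ wakeWords := by fin_cases hv <;> decide
    exact h1 (List.any_eq_true.mpr ⟨v, hvk, (PySem.Str.isIn_iff_infix _ _).mpr ((PySem.Chars.isIn_iff_infix _ _).mp hIn)⟩)

-- ===== VERDICT (by name: the statement is the Claim_ definition above) =====
theorem detect_wake_word_spec : Claim_equal_detect_wake_word := by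
  intro text _
  unfold Spec_detect_wake_word
  match text with
  | none => rfl
  | some t0 =>
    by_cases h0 : t0 = ""
    · simp [detect_wake_word, detect_wake_word_alt, h0]
    · simp only [detect_wake_word, detect_wake_word_alt, if_neg h0]
      exact core_eq _
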